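-- pv_equiv track=rewrite | github.com/spia-bench/SPIA-benchmark | src/evaluate/privacy/evaluate_recall.py | generate_entities_by_span_search
-- ===== SOURCE A (Python) =====
-- from typing import List, Dict, Tuple, Set
--
-- def generate_entities_by_span_search(
--     original_text: str,
--     anonymized_text: str,
--     gt_entities: List[Dict]
-- ) -> List[Dict]:
--     """
--     Generate anonymized entities by searching GT entity span_text in anonymized_text.
--
--     Method: For each GT entity, check if its span_text exists in anonymized_text.
--     If NOT found, the entity is considered masked (add to result).
--     If found, the entity is NOT masked (skip).
--
--     Returns: List of entities that were masked (span_text not found in anonymized_text)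
--     """
--     masked_entities = []
--
--     for entity in gt_entities:
--         span_text = entity.get("span_text", "")
--         if not span_text:
--             continue
--
--         # If span_text is NOT found in anonymized_text, it was masked
--         if span_text not in anonymized_text:
--             masked_entities.append(entity)
--
--     return masked_entities
-- ===== SOURCE B (Python) =====
-- def generate_entities_by_span_search(original_text, anonymized_text, gt_entities):
--     # Pass 1: build an index of the distinct non-empty span_texts that DO occur
--     # in anonymized_text, testing each distinct span at most once.
--     seen = set()
--     present = set()
--     for entity in gt_entities:
--         s = entity.get("span_text", "")
--         if s and s not in seen:
--             seen.add(s)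
--             if s in anonymized_text:
--                 present.add(s)
--     # Pass 2: keep exactly the entities whose (non-empty) span is not present.
--     return [entity for entity in gt_entities
--             if entity.get("span_text", "") and entity.get("span_text", "") not in present]
-- ===== Notes on version B (the rewrite author's own statement) =====
-- stated objective: alternative
-- what changed: B replaces A's single filtering loop (one substring search per entity) by two phases: first build a set of the distinct non-empty span_texts found in anonymized_text (each distinct span searched once), then filter the entity list by set membership, so duplicate spans are never re-searched.
import Mathlib
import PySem

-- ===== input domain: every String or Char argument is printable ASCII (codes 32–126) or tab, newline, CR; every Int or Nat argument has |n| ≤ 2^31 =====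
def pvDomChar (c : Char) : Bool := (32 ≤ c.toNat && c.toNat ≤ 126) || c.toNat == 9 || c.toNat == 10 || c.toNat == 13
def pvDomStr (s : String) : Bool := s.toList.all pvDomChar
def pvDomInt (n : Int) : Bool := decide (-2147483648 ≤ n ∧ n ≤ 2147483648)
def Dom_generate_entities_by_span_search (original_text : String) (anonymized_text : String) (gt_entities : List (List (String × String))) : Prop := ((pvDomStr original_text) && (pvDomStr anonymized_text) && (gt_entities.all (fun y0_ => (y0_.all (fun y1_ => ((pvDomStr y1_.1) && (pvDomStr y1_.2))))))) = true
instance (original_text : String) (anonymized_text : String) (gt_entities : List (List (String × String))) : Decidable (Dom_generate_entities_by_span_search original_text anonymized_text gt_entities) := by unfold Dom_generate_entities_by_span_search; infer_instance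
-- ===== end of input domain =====

-- B builds a set of the distinct non-empty spans found in anonymized_text once, then
-- filters the entity list by set membership (alternative decomposition; return value equal).

-- ===== PORT A =====
def generate_entities_by_span_search (original_text : String) (anonymized_text : String) (gt_entities : List (List (String × String))) : List (List (String × String)) :=
  gt_entities.foldl (fun masked_entities entity =>
    let span_text := (PySem.Dict.mk entity).getD "span_text" ""
    if span_text = "" then masked_entities
    else if PySem.Str.isIn span_text anonymized_text = false then masked_entities ++ [entity]
    else masked_entities) []

-- ===== PORT B =====
def generate_entities_by_span_search_alt (original_text : String) (anonymized_text : String) (gt_entities : List (List (String × String))) : List (List (String × String)) :=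
  let st := gt_entities.foldl (fun (st : PySem.Set String × PySem.Set String) entity =>
    let s := (PySem.Dict.mk entity).getD "span_text" ""
    if s ≠ "" ∧ ¬ s ∈ st.1 then
      (PySem.Set.add st.1 s,
       if PySem.Str.isIn s anonymized_text then PySem.Set.add st.2 s else st.2)
    else st) (PySem.Set.empty, PySem.Set.empty)
  gt_entities.filter (fun entity =>
    let s := (PySem.Dict.mk entity).getD "span_text" ""
    decide (s ≠ "") && !(PySem.Set.contains st.2 s))

-- ===== PRECONDITION & SPEC =====
def Spec_generate_entities_by_span_search (original_text : String) (anonymized_text : String) (gt_entities : List (List (String × String))) (out : List (List (String × String))) : Prop := out = generate_entities_by_span_search_alt original_text anonymized_text gt_entities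
instance (original_text : String) (anonymized_text : String) (gt_entities : List (List (String × String))) (out : List (List (String × String))) : Decidable (Spec_generate_entities_by_span_search original_text anonymized_text gt_entities out) := by unfold Spec_generate_entities_by_span_search; infer_instance

-- ===== CLAIM (what is proved, stated in full; the proofs are below) =====
def Claim_equal_generate_entities_by_span_search : Prop := ∀ (original_text : String) (anonymized_text : String) (gt_entities : List (List (String × String))), Dom_generate_entities_by_span_search original_text anonymized_text gt_entities → Spec_generate_entities_by_span_search original_text anonymized_text gt_entities (generate_entities_by_span_search original_text anonymized_text gt_entities)

-- ===== LEMMAS AND PROOFS =====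

-- the span of an entity
def pvSpan (e : List (String × String)) : String := (PySem.Dict.mk e).getD "span_text" ""

-- B's index-building step
def pvStep (anonymized_text : String) (st : PySem.Set String × PySem.Set String) (entity : List (String × String)) : PySem.Set String × PySem.Set String :=
  let s := pvSpan entity
  if s ≠ "" ∧ ¬ s ∈ st.1 then
    (PySem.Set.add st.1 s,
     if PySem.Str.isIn s anonymized_text then PySem.Set.add st.2 s else st.2)
  else st

-- A's loop body
def pvStepA (anonymized_text : String) (acc : List (List (String × String))) (entity : List (String × String)) : List (List (String × String)) :=
  if pvSpan entity = "" then acc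
  else if PySem.Str.isIn (pvSpan entity) anonymized_text = false then acc ++ [entity]
  else acc

-- the predicate A effectively filters by
def pvKeep (anonymized_text : String) (e : List (String × String)) : Bool :=
  decide (pvSpan e ≠ "") && !(PySem.Str.isIn (pvSpan e) anonymized_text)

-- Invariant: the "present" component holds exactly the seen spans occurring in anonymized_text;
-- plus a characterization of the final "seen" component.
theorem pvFold_char (anon : String) (l : List (List (String × String)))
    (A B : PySem.Set String)
    (hinv : ∀ x, x ∈ B ↔ x ∈ A ∧ PySem.Str.isIn x anon = true) :
    (∀ x, x ∈ (l.foldl (pvStep anon) (A, B)).2 ↔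
        x ∈ (l.foldl (pvStep anon) (A, B)).1 ∧ PySem.Str.isIn x anon = true) ∧
    (∀ x, x ∈ (l.foldl (pvStep anon) (A, B)).1 ↔
        x ∈ A ∨ (∃ e ∈ l, pvSpan e = x ∧ x ≠ "")) := by
  induction l generalizing A B with
  | nil => simpa using hinv
  | cons e t ih =>
    simp only [List.foldl_cons]
    by_cases h : pvSpan e ≠ "" ∧ ¬ pvSpan e ∈ A
    · have hstep : pvStep anon (A, B) e =
        (PySem.Set.add A (pvSpan e),
         if PySem.Str.isIn (pvSpan e) anon then PySem.Set.add B (pvSpan e) else B) := by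
        simp only [pvStep, if_pos h]
      rw [hstep]
      have hinv' : ∀ x, x ∈ (if PySem.Str.isIn (pvSpan e) anon then PySem.Set.add B (pvSpan e) else B) ↔
          x ∈ PySem.Set.add A (pvSpan e) ∧ PySem.Str.isIn x anon = true := by
        intro x
        rcases hb : PySem.Str.isIn (pvSpan e) anon with _ | _
        · rw [if_neg Bool.false_ne_true, hinv x, PySem.Set.mem_add]
          constructor
          · rintro ⟨hA, hI⟩; exact ⟨Or.inl hA, hI⟩
          · rintro ⟨hA | rfl, hI⟩
            · exact ⟨hA, hI⟩
            · rw [hb] at hI; exact (Bool.false_ne_true hI).elim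
        · rw [if_pos rfl, PySem.Set.mem_add, PySem.Set.mem_add, hinv x]
          constructor
          · rintro (⟨hA, hI⟩ | rfl)
            · exact ⟨Or.inl hA, hI⟩
            · exact ⟨Or.inr rfl, hb⟩
          · rintro ⟨hA | rfl, hI⟩
            · exact Or.inl ⟨hA, hI⟩
            · exact Or.inr rfl
      obtain ⟨c1, c2⟩ := ih (PySem.Set.add A (pvSpan e)) _ hinv'
      refine ⟨c1, fun x => ?_⟩
      rw [c2 x]
      simp only [PySem.Set.mem_add, List.mem_cons]
      constructor
      · rintro ((hA | rfl) | ⟨e', he', rfl, hne⟩)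
        · exact Or.inl hA
        · exact Or.inr ⟨e, Or.inl rfl, rfl, h.1⟩
        · exact Or.inr ⟨e', Or.inr he', rfl, hne⟩
      · rintro (hA | ⟨e', (rfl | he'), rfl, hne⟩)
        · exact Or.inl (Or.inl hA)
        · exact Or.inl (Or.inr rfl)
        · exact Or.inr ⟨e', he', rfl, hne⟩
    · have hstep : pvStep anon (A, B) e = (A, B) := by
        simp only [pvStep, if_neg h]
      rw [hstep]
      obtain ⟨c1, c2⟩ := ih A B hinv
      refine ⟨c1, fun x => ?_⟩
      rw [c2 x]
      simp only [List.mem_cons]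
      constructor
      · rintro (hA | ⟨e', he', rfl, hne⟩)
        · exact Or.inl hA
        · exact Or.inr ⟨e', Or.inr he', rfl, hne⟩
      · rintro (hA | ⟨e', (rfl | he'), rfl, hne⟩)
        · exact Or.inl hA
        · rcases Decidable.not_and_iff_not_or_not.mp h with h' | h'
          · exact absurd hne (by simpa using h')
          · exact Or.inl (by simpa using h')
        · exact Or.inr ⟨e', he', rfl, hne⟩

-- A's fold is the filter by pvKeep
theorem pvA_eq_filter (anon : String) (l : List (List (String × String))) (acc : List (List (String × String))) :
    l.foldl (pvStepA anon) acc = acc ++ l.filter (pvKeep anon) := by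
  induction l generalizing acc with
  | nil => simp
  | cons e t ih =>
    rw [List.foldl_cons, List.filter_cons]
    simp only [pvStepA]
    by_cases h1 : pvSpan e = ""
    · rw [if_pos h1, ih]
      have : pvKeep anon e = false := by simp [pvKeep, h1]
      rw [this, if_neg Bool.false_ne_true]
    · rw [if_neg h1]
      rcases h2 : PySem.Str.isIn (pvSpan e) anon with _ | _
      · rw [if_pos rfl, ih]
        have : pvKeep anon e = true := by
          simp only [pvKeep, h2]
          simp [h1]
        rw [this, if_pos rfl]
        simp
      · rw [if_neg (by simp), ih]
        have : pvKeep anon e = false := by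
          simp only [pvKeep, h2]
          simp
        rw [this, if_neg Bool.false_ne_true]

-- ===== VERDICT (by name: the statement is the Claim_ definition above) =====
theorem generate_entities_by_span_search_spec : Claim_equal_generate_entities_by_span_search := by
  intro original_text anonymized_text gt_entities _
  unfold Spec_generate_entities_by_span_search
  unfold generate_entities_by_span_search generate_entities_by_span_search_alt
  rw [show (fun (st : PySem.Set String × PySem.Set String) (entity : List (String × String)) =>
      let s := (PySem.Dict.mk entity).getD "span_text" ""
      if s ≠ "" ∧ ¬ s ∈ st.1 then
        (PySem.Set.add st.1 s,
         if PySem.Str.isIn s anonymized_text then PySem.Set.add st.2 s else st.2)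
      else st) = pvStep anonymized_text from rfl]
  rw [show (fun (masked_entities : List (List (String × String))) (entity : List (String × String)) =>
      let span_text := (PySem.Dict.mk entity).getD "span_text" ""
      if span_text = "" then masked_entities
      else if PySem.Str.isIn span_text anonymized_text = false then masked_entities ++ [entity]
      else masked_entities) = pvStepA anonymized_text from rfl]
  rw [pvA_eq_filter, List.nil_append]
  obtain ⟨c1, c2⟩ := pvFold_char anonymized_text gt_entities PySem.Set.empty PySem.Set.empty
    (by intro x; simp [PySem.Set.empty])
  apply List.filter_congr
  intro e he
  show pvKeep anonymized_text e =
    (decide (pvSpan e ≠ "") &&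
      !(PySem.Set.contains (gt_entities.foldl (pvStep anonymized_text) (PySem.Set.empty, PySem.Set.empty)).2 (pvSpan e)))
  by_cases h1 : pvSpan e = ""
  · simp [pvKeep, h1]
  · have hmem : pvSpan e ∈ (gt_entities.foldl (pvStep anonymized_text) (PySem.Set.empty, PySem.Set.empty)).1 := by
      rw [c2 (pvSpan e)]
      exact Or.inr ⟨e, he, rfl, h1⟩
    have hiff : pvSpan e ∈ (gt_entities.foldl (pvStep anonymized_text) (PySem.Set.empty, PySem.Set.empty)).2 ↔
        PySem.Str.isIn (pvSpan e) anonymized_text = true := by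
      rw [c1 (pvSpan e)]
      exact ⟨fun h => h.2, fun h => ⟨hmem, h⟩⟩
    have hc : PySem.Set.contains (gt_entities.foldl (pvStep anonymized_text) (PySem.Set.empty, PySem.Set.empty)).2 (pvSpan e)
        = PySem.Str.isIn (pvSpan e) anonymized_text := by
      rcases hb : PySem.Str.isIn (pvSpan e) anonymized_text with _ | _
      · rw [Bool.eq_false_iff]
        intro hcon
        have hx := hiff.mp ((PySem.Set.contains_iff _ _).mp hcon)
        rw [hb] at hx
        exact Bool.false_ne_true hx
      · exact (PySem.Set.contains_iff _ _).mpr (hiff.mpr hb)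
    rw [pvKeep, hc]
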